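-- pv_equiv track=rewrite | github.com/familiar9x/fluxweave_ticket | nzha-3064.convert_scomparing.py | parse_outer_join_conditions
-- ===== SOURCE A (Python) =====
-- from typing import Dict, List, Tuple
--
-- def parse_outer_join_conditions(where_clause: str) -> Tuple[List[str], List[str], List[str]]:
--     """
--     Parse WHERE clause to extract:
--     - Conditions with (+) that need to be moved to LEFT JOIN
--     - Regular join conditions (without +)
--     - Filter conditions
--     """
--     conditions = [c.strip() for c in where_clause.split(' AND ')]
--
--     left_join_conditions = []
--     join_conditions = []
--     filter_conditions = []
--
--     for cond in conditions:
--         if '(+)' in cond: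
--             # This is an outer join condition
--             left_join_conditions.append(cond)
--         elif '=' in cond and not any(op in cond for op in ['!=', '>=', '<=', '<>', 'IN (', 'SELECT']):
--             # This is a regular join condition
--             # Check if it involves table aliases from both sides
--             join_conditions.append(cond)
--         else:
--             # This is a filter condition
--             filter_conditions.append(cond)
--
--     return left_join_conditions, join_conditions, filter_conditions
-- ===== SOURCE B (Python) =====
-- def parse_outer_join_conditions(where_clause):
--     def category(c):
--         if '(+)' in c:
--             return 0
--         if '=' in c and not any(op in c for op in ('!=', '>=', '<=', '<>', 'IN (', 'SELECT')):
--             return 1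
--         return 2
--
--     def go(raw):
--         if not raw:
--             return ([], [], [])
--         rest = go(raw[1:])
--         c = raw[0].strip()
--         k = category(c)
--         return tuple([c] + rest[j] if j == k else rest[j] for j in range(3))
--
--     return go(where_clause.split(' AND '))
-- ===== Notes on version B (the rewrite author's own statement) =====
-- stated objective: alternative
-- what changed: Replaces A's single left-to-right accumulator loop (with a pre-pass that strips all conditions) by a right-to-left structural recursion that strips each condition on the fly, maps it to a numeric category and conses it onto the matching bucket of the recursive result, building the three lists back-to-front with no accumulator.
import Mathlib
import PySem

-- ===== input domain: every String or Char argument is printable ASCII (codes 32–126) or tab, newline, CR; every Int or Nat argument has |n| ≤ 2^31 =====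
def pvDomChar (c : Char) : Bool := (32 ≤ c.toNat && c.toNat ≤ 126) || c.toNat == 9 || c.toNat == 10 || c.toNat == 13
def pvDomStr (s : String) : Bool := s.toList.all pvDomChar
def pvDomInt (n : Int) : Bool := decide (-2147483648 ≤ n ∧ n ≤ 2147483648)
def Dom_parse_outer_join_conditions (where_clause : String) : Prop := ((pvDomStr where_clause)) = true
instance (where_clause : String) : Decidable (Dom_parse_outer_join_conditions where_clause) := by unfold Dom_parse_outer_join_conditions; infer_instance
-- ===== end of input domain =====

-- B replaces A's single accumulator loop (with a separate stripping pre-pass) by a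
-- right-to-left structural recursion that strips and classifies each condition and
-- conses it onto the matching bucket (alternative decomposition, same cost).


-- ===== PORT A =====
-- where_clause.split(' AND '): separator is a nonempty literal, so split? is always `some`
def parse_outer_join_conditions (where_clause : String) : List String × List String × List String :=
  let conditions := ((PySem.Str.split? where_clause " AND ").getD []).map PySem.Str.strip
  conditions.foldl (fun (acc : List String × List String × List String) cond =>
    if PySem.Str.isIn "(+)" cond then
      (acc.1 ++ [cond], acc.2.1, acc.2.2)
    else if PySem.Str.isIn "=" cond
        && !(["!=", ">=", "<=", "<>", "IN (", "SELECT"].any (fun op => PySem.Str.isIn op cond)) then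
      (acc.1, acc.2.1 ++ [cond], acc.2.2)
    else
      (acc.1, acc.2.1, acc.2.2 ++ [cond])) ([], [], [])

-- ===== PORT B =====
def pojCategory (c : String) : Nat :=
  if PySem.Str.isIn "(+)" c then 0
  else if PySem.Str.isIn "=" c
      && !(["!=", ">=", "<=", "<>", "IN (", "SELECT"].any (fun op => PySem.Str.isIn op c)) then 1
  else 2

-- Source B's `go`: right-to-left recursion; the tuple comprehension `[c]+rest[j] if j==k`
-- is rendered as the three-way match on the category index k.
def pojGo : List String → List String × List String × List String
  | [] => ([], [], [])
  | raw0 :: raws =>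
    let rest := pojGo raws
    let c := PySem.Str.strip raw0
    match pojCategory c with
    | 0 => (c :: rest.1, rest.2.1, rest.2.2)
    | 1 => (rest.1, c :: rest.2.1, rest.2.2)
    | _ => (rest.1, rest.2.1, c :: rest.2.2)

def parse_outer_join_conditions_alt (where_clause : String) : List String × List String × List String :=
  pojGo ((PySem.Str.split? where_clause " AND ").getD [])

-- ===== PRECONDITION & SPEC =====
def Spec_parse_outer_join_conditions (where_clause : String) (out : List String × List String × List String) : Prop := out = parse_outer_join_conditions_alt where_clause
instance (where_clause : String) (out : List String × List String × List String) : Decidable (Spec_parse_outer_join_conditions where_clause out) := by unfold Spec_parse_outer_join_conditions; infer_instance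

-- ===== CLAIM (what is proved, stated in full; the proofs are below) =====
def Claim_equal_parse_outer_join_conditions : Prop := ∀ (where_clause : String), Dom_parse_outer_join_conditions where_clause → Spec_parse_outer_join_conditions where_clause (parse_outer_join_conditions where_clause)

-- ===== LEMMAS AND PROOFS =====

-- A's dispatch fold over the stripped list, from any accumulators, appends exactly
-- the three buckets that B's recursion builds back-to-front.
theorem poj_foldl_eq_go (l : List String) (a b c : List String) :
    (l.map PySem.Str.strip).foldl (fun (acc : List String × List String × List String) cond =>
      if PySem.Str.isIn "(+)" cond then
        (acc.1 ++ [cond], acc.2.1, acc.2.2)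
      else if PySem.Str.isIn "=" cond
          && !(["!=", ">=", "<=", "<>", "IN (", "SELECT"].any (fun op => PySem.Str.isIn op cond)) then
        (acc.1, acc.2.1 ++ [cond], acc.2.2)
      else
        (acc.1, acc.2.1, acc.2.2 ++ [cond])) (a, b, c)
    = (a ++ (pojGo l).1, b ++ (pojGo l).2.1, c ++ (pojGo l).2.2) := by
  induction l generalizing a b c with
  | nil => simp [pojGo]
  | cons x xs ih =>
    simp only [List.map_cons, List.foldl_cons, pojGo, pojCategory]
    by_cases h1 : PySem.Str.isIn "(+)" (PySem.Str.strip x) = true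
    · simp only [h1, reduceIte]
      rw [ih]
      simp [List.append_assoc]
    · by_cases h2 : (PySem.Str.isIn "=" (PySem.Str.strip x)
          && !(["!=", ">=", "<=", "<>", "IN (", "SELECT"].any
                (fun op => PySem.Str.isIn op (PySem.Str.strip x)))) = true
      · simp only [h1, h2, reduceIte]
        rw [ih]
        simp [List.append_assoc]
      · simp only [h1, h2]
        rw [ih]
        simp [List.append_assoc]

-- ===== VERDICT (by name: the statement is the Claim_ definition above) =====
theorem parse_outer_join_conditions_spec : Claim_equal_parse_outer_join_conditions := by
  intro w _
  show parse_outer_join_conditions w = parse_outer_join_conditions_alt w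
  unfold parse_outer_join_conditions parse_outer_join_conditions_alt
  rw [poj_foldl_eq_go]
  simp
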